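-- pv_equiv track=rewrite | github.com/EleanorWhite/WordSalad | solve.py | goodWord
-- ===== SOURCE A (Python) =====
-- def goodWord(line, center, outers):
--     hasCenter = False
--     for c in line.strip():
--         if not ((c in outers) or (c == center)):
--             return False
--         if (c == center):
--             hasCenter = True
--     return hasCenter
-- ===== SOURCE B (Python) =====
-- def goodWord(line, center, outers):
--     chars = set(line.strip())
--     allowed = set(outers) | {center}
--     return chars.issubset(allowed) and center in chars
-- ===== Notes on version B (the rewrite author's own statement) =====
-- stated objective: simpler
-- what changed: Replaced the per-character short-circuit loop with its hasCenter flag by deduplicated set operations: chars-of-line subset of set(outers)|{center}, plus a set membership test for the center.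
import Mathlib
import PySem

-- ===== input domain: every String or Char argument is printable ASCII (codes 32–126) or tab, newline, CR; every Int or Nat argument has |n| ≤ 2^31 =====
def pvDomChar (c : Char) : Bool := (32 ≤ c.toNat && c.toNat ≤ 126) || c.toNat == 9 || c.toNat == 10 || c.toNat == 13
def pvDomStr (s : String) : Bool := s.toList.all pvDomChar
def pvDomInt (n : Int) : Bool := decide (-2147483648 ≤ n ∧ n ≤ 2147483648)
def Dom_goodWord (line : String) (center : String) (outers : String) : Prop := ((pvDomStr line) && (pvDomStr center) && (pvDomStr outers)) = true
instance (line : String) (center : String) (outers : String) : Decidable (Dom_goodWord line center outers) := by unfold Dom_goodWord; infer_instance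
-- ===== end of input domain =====

-- B replaces A's per-character short-circuit loop with a hasCenter flag by whole-set
-- subset/membership tests on deduplicated character sets (objective: simpler).

-- ===== PORT A =====
-- the loop body: early-return False on a disallowed char, set the flag on the center char
def goodWordGo (center : String) (outers : String) (cs : List Char) (hasCenter : Bool) : Bool :=
  match cs with
  | [] => hasCenter
  | c :: rest =>
    if !(PySem.Chars.isIn [c] outers.toList || center.toList == [c]) then false
    else goodWordGo center outers rest (if center.toList == [c] then true else hasCenter)

def goodWord (line : String) (center : String) (outers : String) : Bool :=
  goodWordGo center outers (PySem.Str.strip line).toList false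

-- ===== PORT B =====
-- chars = set(line.strip()); allowed = set(outers) | {center}; chars <= allowed and center in chars
-- (Python's length-1 strings are modelled as String.ofList [c], so the mixed set {center} ∪ set(outers) is a PySem.Set String)
def goodWord_alt (line : String) (center : String) (outers : String) : Bool :=
  let chars : PySem.Set String :=
    PySem.Set.ofList ((PySem.Str.strip line).toList.map (fun c => String.ofList [c]))
  let allowed : PySem.Set String :=
    PySem.Set.union (PySem.Set.ofList (outers.toList.map (fun c => String.ofList [c]))) [center]
  PySem.Set.issubset chars allowed && PySem.Set.contains chars center

-- ===== PRECONDITION & SPEC =====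
def Spec_goodWord (line : String) (center : String) (outers : String) (out : Bool) : Prop := out = goodWord_alt line center outers
instance (line : String) (center : String) (outers : String) (out : Bool) : Decidable (Spec_goodWord line center outers out) := by unfold Spec_goodWord; infer_instance

-- ===== CLAIM (what is proved, stated in full; the proofs are below) =====
def Claim_equal_goodWord : Prop := ∀ (line : String) (center : String) (outers : String), Dom_goodWord line center outers → Spec_goodWord line center outers (goodWord line center outers)

-- ===== LEMMAS AND PROOFS =====

-- single-char String equality reduces to the character
theorem mk_singleton_eq_iff (c : Char) (s : String) : String.ofList [c] = s ↔ s.toList = [c] := by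
  constructor
  · rintro rfl; exact String.toList_ofList
  · intro h; rw [← h]; exact String.ofList_toList

-- `c in outers` (substring test on a 1-char string) is character membership
theorem isIn_singleton_iff (c : Char) (l : List Char) : PySem.Chars.isIn [c] l = true ↔ c ∈ l := by
  rw [PySem.Chars.isIn_iff_infix]; exact List.singleton_infix_iff c l

-- closed form of A's loop: every char allowed, and the flag or some center char seen
theorem goodWordGo_eq (center outers : String) (cs : List Char) (b : Bool) :
    goodWordGo center outers cs b =
      (cs.all (fun c => PySem.Chars.isIn [c] outers.toList || center.toList == [c]) &&
       (b || cs.any (fun c => center.toList == [c]))) := by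
  induction cs generalizing b with
  | nil => simp [goodWordGo]
  | cons c rest ih =>
    by_cases hc : center.toList = [c]
    · simp [goodWordGo, hc, ih]
    · by_cases hin : PySem.Chars.isIn [c] outers.toList = true
      · have hb : (center.toList == [c]) = false := by simpa using hc
        simp [goodWordGo, hb, hin, ih]
      · simp [goodWordGo, hc, hin]

theorem goodWord_spec : Claim_equal_goodWord := by
  intro line center outers _
  show goodWord line center outers = goodWord_alt line center outers
  unfold goodWord goodWord_alt
  rw [goodWordGo_eq]
  set cs := (PySem.Str.strip line).toList with hcs
  rw [Bool.eq_iff_iff]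
  simp only [Bool.and_eq_true, List.all_eq_true, List.any_eq_true, Bool.or_eq_true,
    PySem.Set.issubset_iff, PySem.Set.contains_iff, PySem.Set.mem_union, PySem.Set.mem_ofList,
    List.mem_map, beq_iff_eq, Bool.false_or]
  constructor
  · rintro ⟨hall, c, hmem, hc⟩
    refine ⟨?_, c, hmem, (mk_singleton_eq_iff c center).mpr hc⟩
    rintro x ⟨c', hc', rfl⟩
    rcases hall c' hc' with h | h
    · exact Or.inl ⟨c', (isIn_singleton_iff c' outers.toList).mp h, rfl⟩
    · exact Or.inr (List.mem_singleton.mpr ((mk_singleton_eq_iff c' center).mpr h))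
  · rintro ⟨hsub, c, hmem, hc⟩
    refine ⟨?_, c, hmem, (mk_singleton_eq_iff c center).mp hc⟩
    intro c' hc'
    rcases hsub (String.ofList [c']) ⟨c', hc', rfl⟩ with ⟨d, hd, hdc⟩ | h
    · left
      have : c' = d := by
        have := congrArg String.toList hdc
        simp only [String.toList_ofList] at this
        exact (List.singleton_injective this).symm
      exact (isIn_singleton_iff c' outers.toList).mpr (this ▸ hd)
    · exact Or.inr ((mk_singleton_eq_iff c' center).mp (List.mem_singleton.mp h))
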